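-- pv_equiv track=rewrite | github.com/potato3641/algo | SWEA/221009/12005.py | funcf
-- ===== SOURCE A (Python) =====
-- def gcd(a, b):
--     while b:
--         temp = a%b
--         a = b
--         b = temp
--     if a==1:
--         return True
--     return False
--
-- def funcf(n, m):
--     cnt = 0
--     i = n
--     while True:
--         i += 1
--         if gcd(i, n):
--             cnt += 1
--             if cnt == m:
--                 return i
-- ===== SOURCE B (Python) =====
-- def funcf(n, m):
--     # coprimality to n is periodic with period n: collect the coprime residues
--     # r in 1..n once (returning early if the m-th coprime lies in the first
--     # block), then jump whole blocks of length n with a single divmod.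
--     def cop(a, b):
--         while b:
--             a, b = b, a % b
--         return a == 1
--     res = []
--     for r in range(1, n + 1):
--         if cop(r, n):
--             res.append(r)
--             if len(res) == m:
--                 return n + r
--     q, rem = divmod(m - 1, len(res))
--     return n + q * n + res[rem]
-- ===== Notes on version B (the rewrite author's own statement) =====
-- stated objective: alternative
-- what changed: B replaces A's unbounded one-by-one scan above n by a single pass over the residues 1..n (returning early if the m-th coprime is in the first block) plus one divmod jump over whole blocks of length n, exploiting the period-n periodicity of coprimality.
-- outside the precondition, e.g. on funcf(0, 1): A returns 1, B raises ZeroDivisionError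
import Mathlib
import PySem

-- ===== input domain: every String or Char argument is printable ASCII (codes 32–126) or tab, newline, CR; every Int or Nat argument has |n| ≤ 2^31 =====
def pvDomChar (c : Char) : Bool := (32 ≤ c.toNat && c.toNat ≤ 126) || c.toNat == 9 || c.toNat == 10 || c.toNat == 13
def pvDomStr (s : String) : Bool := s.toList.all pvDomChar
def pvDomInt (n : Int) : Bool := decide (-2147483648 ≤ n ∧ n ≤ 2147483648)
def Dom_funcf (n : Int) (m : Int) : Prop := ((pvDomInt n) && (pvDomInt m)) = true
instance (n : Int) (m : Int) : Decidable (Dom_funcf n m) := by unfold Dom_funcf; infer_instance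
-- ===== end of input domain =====

-- B replaces A's one-by-one scan for the m-th coprime above n by precomputing the
-- coprime residues in 1..n once and jumping whole blocks with divmod (objective: alternative).

-- ===== PORT A =====

-- termination helper for the Euclid loop (cited by gcdLoopA's decreasing_by)
theorem pvModAbsLt (a b : Int) (h : ¬ b = 0) : (PySem.Int.mod a b).natAbs < b.natAbs := by
  rcases lt_or_gt_of_ne h with hb | hb
  · have h1 := PySem.Int.mod_neg_bounds a hb
    omega
  · have h1 := PySem.Int.mod_nonneg a hb
    have h2 := PySem.Int.mod_lt a hb
    omega

-- A's gcd: 'while b: temp = a%b; a = b; b = temp'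
def gcdLoopA (a b : Int) : Int :=
  if h : b = 0 then a else gcdLoopA b (PySem.Int.mod a b)
termination_by b.natAbs
decreasing_by exact pvModAbsLt a b h

-- 'if a==1: return True; return False'
def gcdA (a b : Int) : Bool := gcdLoopA a b == 1

-- A's 'while True' loop, one fuel unit per iteration; none = the Python loop has not
-- returned within 'fuel' iterations (under Pre_ the chosen fuel is proved sufficient).
def loopA (n m : Int) : Nat → Int → Int → Option Int
  | 0, _, _ => none
  | fuel+1, cnt, i =>
      if gcdA (i+1) n then
        if cnt + 1 = m then some (i+1)
        else loopA n m fuel (cnt+1) (i+1)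
      else loopA n m fuel cnt (i+1)

def funcf (n : Int) (m : Int) : Int :=
  (loopA n m (m.toNat * n.toNat) 0 n).getD 0

-- ===== PORT B =====

-- B's cop: 'while b: a, b = b, a % b; return a == 1'
def copB (a b : Int) : Bool :=
  if h : b = 0 then a == 1 else copB b (PySem.Int.mod a b)
termination_by b.natAbs
decreasing_by exact pvModAbsLt a b h

-- B's 'for r in range(1, n+1)' loop (one step per r, early return at the m-th coprime);
-- the loop counter r starts at 1 and the remaining iteration count n.toNat is the fuel
def buildB (n m : Int) : Nat → Int → List Int → Sum Int (List Int)
  | 0, _, res => Sum.inr res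
  | fuel+1, r, res =>
      if copB r n then
        if ((res ++ [r]).length : Int) = m then Sum.inl (n + r)
        else buildB n m fuel (r+1) (res ++ [r])
      else buildB n m fuel (r+1) res

def funcf_alt (n : Int) (m : Int) : Int :=
  match buildB n m n.toNat 1 [] with
  | Sum.inl v => v
  | Sum.inr res =>
      match PySem.Int.divmod? (m - 1) (res.length : Int) with
      | none => 0            -- Python: ZeroDivisionError (outside Pre_)
      | some (q, rem) =>
          match PySem.List.pyGet? res rem with
          | none => 0        -- Python: IndexError (never reached when divmod? succeeds)
          | some v => n + q * n + v

-- ===== PRECONDITION & SPEC =====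
-- Pre_ excludes n ≤ 0 and m ≤ 0: there A diverges, except n = 0, m = 1, where A's
-- returning 1 is an accident of its gcd(1,0)=1 corner and B raises ZeroDivisionError.
def Pre_funcf (n : Int) (m : Int) : Prop := 1 ≤ n ∧ 1 ≤ m
instance (n : Int) (m : Int) : Decidable (Pre_funcf n m) := by unfold Pre_funcf; infer_instance
def pvWitness_funcf : Int × Int := (4, 3)

def Spec_funcf (n : Int) (m : Int) (out : Int) : Prop := out = funcf_alt n m
instance (n : Int) (m : Int) (out : Int) : Decidable (Spec_funcf n m out) := by unfold Spec_funcf; infer_instance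

-- ===== CLAIM (what is proved, stated in full; the proofs are below) =====
def Claim_equal_funcf : Prop := ∀ (n : Int) (m : Int), Dom_funcf n m → Pre_funcf n m → Spec_funcf n m (funcf n m)

-- ===== LEMMAS AND PROOFS =====

-- consecutive integers s, s+1, …, s+k-1
def pvInts (s : Int) : Nat → List Int
  | 0 => []
  | k+1 => s :: pvInts (s+1) k

def pvRes (n : Int) : List Int := (pvInts 1 n.toNat).filter (fun r => gcdA r n)

def pvBig (n : Int) (b : Nat) : List Int :=
  (List.range b).flatMap (fun k : Nat => (pvRes n).map (fun r => n + (k : Int) * n + r))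

theorem gcdLoopA_eq_gcd (k : Nat) : ∀ b a : Int, b.natAbs ≤ k → 0 < b →
    gcdLoopA a b = Int.gcd a b := by
  induction k with
  | zero => intro b a hb hbpos; omega
  | succ k ih =>
    intro b a hb hbpos
    rw [gcdLoopA, dif_neg (by omega : ¬ b = 0)]
    have hrem : PySem.Int.mod a b = a % b := PySem.Int.mod_eq_emod_of_pos hbpos
    by_cases h0 : PySem.Int.mod a b = 0
    · rw [h0, gcdLoopA, dif_pos rfl]
      have hdvd : b ∣ a := by
        rw [hrem] at h0
        exact Int.dvd_of_emod_eq_zero h0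
      rw [Int.gcd_eq_natAbs_right_iff_dvd.mpr hdvd]
      omega
    · have h1 := PySem.Int.mod_nonneg a hbpos
      have h2 := PySem.Int.mod_lt a hbpos
      rw [ih (PySem.Int.mod a b) b (by omega) (by omega)]
      rw [hrem, Int.gcd_comm, Int.gcd_emod]

theorem gcdA_iff (n : Int) (hn : 0 < n) (a : Int) : gcdA a n = true ↔ Int.gcd a n = 1 := by
  rw [gcdA, gcdLoopA_eq_gcd n.natAbs n a le_rfl hn]
  simp only [beq_iff_eq]
  omega

theorem copB_eq_gcdA (k : Nat) : ∀ b a : Int, b.natAbs ≤ k → copB a b = gcdA a b := by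
  induction k with
  | zero =>
    intro b a hb
    have hb0 : b = 0 := by omega
    rw [hb0, copB, dif_pos rfl, gcdA, gcdLoopA, dif_pos rfl]
  | succ k ih =>
    intro b a hb
    by_cases hb0 : b = 0
    · rw [hb0, copB, dif_pos rfl, gcdA, gcdLoopA, dif_pos rfl]
    · rw [copB, dif_neg hb0, gcdA, gcdLoopA, dif_neg hb0]
      have := pvModAbsLt a b hb0
      rw [ih (PySem.Int.mod a b) b (by omega), gcdA]

theorem pvInts_append (j k : Nat) : ∀ s : Int, pvInts s (j + k) = pvInts s j ++ pvInts (s + j) k := by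
  induction j with
  | zero => intro s; simp [pvInts]
  | succ j ih =>
    intro s
    have h1 : j + 1 + k = (j + k) + 1 := by omega
    rw [h1, pvInts, pvInts, ih (s+1)]
    have h2 : s + 1 + (j : Int) = s + ((j : Int) + 1) := by ring
    simp [h2]

theorem pvInts_shift (k : Nat) : ∀ s c : Int, pvInts (s + c) k = (pvInts s k).map (fun x => x + c) := by
  induction k with
  | zero => intro s c; simp [pvInts]
  | succ k ih =>
    intro s c
    rw [pvInts, pvInts]
    have h1 : s + c + 1 = (s + 1) + c := by ring
    simp [h1, ih (s+1) c]

theorem loopA_eq (n m : Int) : ∀ (fuel : Nat) (s cnt : Int), cnt < m →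
    (m - cnt).toNat - 1 < ((pvInts (s+1) fuel).filter (fun i => gcdA i n)).length →
    loopA n m fuel cnt s = ((pvInts (s+1) fuel).filter (fun i => gcdA i n))[(m - cnt).toNat - 1]? := by
  intro fuel
  induction fuel with
  | zero => intro s cnt hcnt h; simp [pvInts] at h
  | succ fuel ih =>
    intro s cnt hcnt h
    rw [pvInts, List.filter_cons] at h ⊢
    rw [loopA]
    by_cases hg : gcdA (s+1) n = true
    · simp only [if_pos hg] at h ⊢
      by_cases hm2 : cnt + 1 = m
      · simp only [if_pos hm2]
        have h0 : (m - cnt).toNat - 1 = 0 := by omega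
        rw [h0, List.getElem?_cons_zero]
      · simp only [if_neg hm2]
        have hcnt2 : cnt + 1 < m := by omega
        have harith : (m - cnt).toNat - 1 = ((m - (cnt+1)).toNat - 1) + 1 := by omega
        rw [harith, List.getElem?_cons_succ]
        rw [List.length_cons] at h
        exact ih (s+1) (cnt+1) hcnt2 (by omega)
    · simp only [if_neg hg] at h ⊢
      exact ih (s+1) cnt hcnt h

theorem filter_blocks (n : Int) (hn : 0 < n) : ∀ b : Nat,
    (pvInts (n+1) (b * n.toNat)).filter (fun i => gcdA i n) = pvBig n b := by
  intro b
  induction b with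
  | zero => simp [pvBig, pvInts]
  | succ b ih =>
    have hnn : ((n.toNat : Nat) : Int) = n := Int.toNat_of_nonneg hn.le
    have hsplit : (b + 1) * n.toNat = b * n.toNat + n.toNat := by ring
    rw [hsplit, pvInts_append, List.filter_append, ih]
    have hstart : (n + 1 + ((b * n.toNat : Nat) : Int)) = 1 + (n + (b : Int) * n) := by
      push_cast [hnn]
      ring
    rw [hstart, pvInts_shift, List.filter_map]
    have hfc : ∀ r ∈ pvInts 1 n.toNat,
        ((fun i => gcdA i n) ∘ (fun x => x + (n + (b : Int) * n))) r = gcdA r n := by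
      intro r _
      simp only [Function.comp]
      have h1 : r + (n + (b : Int) * n) = r + (1 + (b : Int)) * n := by ring
      rw [h1, gcdA, gcdA, gcdLoopA_eq_gcd n.natAbs n _ le_rfl hn,
        gcdLoopA_eq_gcd n.natAbs n _ le_rfl hn,
        Int.gcd_add_mul_right_left n r (1 + (b : Int))]
    rw [List.filter_congr hfc]
    show _ = pvBig n (b + 1)
    rw [pvBig, pvBig, List.range_succ, List.flatMap_append]
    congr 1
    simp only [List.flatMap_cons, List.flatMap_nil, List.append_nil]
    rw [pvRes]
    refine List.map_congr_left (fun x _ => ?_)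
    ring

theorem pvBig_length (n : Int) (b : Nat) : (pvBig n b).length = b * (pvRes n).length := by
  induction b with
  | zero => simp [pvBig]
  | succ b ih =>
    rw [pvBig, List.range_succ, List.flatMap_append] at *
    simp only [List.length_append, List.flatMap_cons, List.flatMap_nil, List.append_nil,
      List.length_map] at *
    rw [ih]
    ring

theorem pvBig_get (n : Int) (b q rem : Nat) (hq : q < b) (hrem : rem < (pvRes n).length) :
    (pvBig n b)[q * (pvRes n).length + rem]? =
      ((pvRes n)[rem]?).map (fun r => n + (q : Int) * n + r) := by
  induction b with
  | zero => omega
  | succ b ih =>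
    rw [pvBig, List.range_succ, List.flatMap_append]
    simp only [List.flatMap_cons, List.flatMap_nil, List.append_nil]
    by_cases hqb : q < b
    · rw [List.getElem?_append_left]
      · exact ih hqb
      · show _ < (pvBig n b).length
        rw [pvBig_length]
        calc q * (pvRes n).length + rem < (q + 1) * (pvRes n).length := by
              rw [Nat.add_mul, Nat.one_mul]; omega
          _ ≤ b * (pvRes n).length := Nat.mul_le_mul_right _ (by omega)
    · have hqe : q = b := by omega
      subst hqe
      rw [List.getElem?_append_right]
      · show (List.map _ (pvRes n))[q * (pvRes n).length + rem - (pvBig n q).length]? = _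
        rw [pvBig_length]
        have : q * (pvRes n).length + rem - q * (pvRes n).length = rem := by omega
        rw [this, List.getElem?_map]
      · show (pvBig n q).length ≤ _
        rw [pvBig_length]
        omega

theorem pvRes_pos (n : Int) (hn : 1 ≤ n) : 0 < (pvRes n).length := by
  obtain ⟨j, hj⟩ : ∃ j, n.toNat = j + 1 := ⟨n.toNat - 1, by omega⟩
  have h1 : gcdA 1 n = true := (gcdA_iff n (by omega) 1).mpr (by simp)
  rw [pvRes, hj, pvInts, List.filter_cons, if_pos h1]
  simp

theorem buildB_eq (n m : Int) : ∀ (fuel : Nat) (r : Int) (acc : List Int), (acc.length : Int) < m →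
    buildB n m fuel r acc =
      match ((pvInts r fuel).filter (fun x => copB x n))[(m - acc.length).toNat - 1]? with
      | some v => Sum.inl (n + v)
      | none => Sum.inr (acc ++ (pvInts r fuel).filter (fun x => copB x n)) := by
  intro fuel
  induction fuel with
  | zero =>
    intro r acc hacc
    simp [buildB, pvInts]
  | succ fuel ih =>
    intro r acc hacc
    rw [buildB, pvInts, List.filter_cons]
    by_cases hc : copB r n = true
    · simp only [if_pos hc]
      by_cases hm2 : ((acc ++ [r]).length : Int) = m
      · simp only [if_pos hm2]
        simp only [List.length_append, List.length_singleton] at hm2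
        have h0 : (m - acc.length).toNat - 1 = 0 := by omega
        rw [h0, List.getElem?_cons_zero]
      · simp only [if_neg hm2]
        simp only [List.length_append, List.length_singleton] at hm2
        have hacc2 : ((acc ++ [r]).length : Int) < m := by
          simp only [List.length_append, List.length_singleton]
          push_cast at hacc hm2 ⊢
          omega
        rw [ih (r+1) (acc ++ [r]) hacc2]
        have harith : (m - acc.length).toNat - 1 = ((m - (acc ++ [r]).length).toNat - 1) + 1 := by
          simp only [List.length_append, List.length_singleton]
          push_cast at hacc hm2 ⊢
          omega
        rw [harith, List.getElem?_cons_succ]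
        cases hF : ((pvInts (r+1) fuel).filter (fun x => copB x n))[(m - ((acc ++ [r]).length : Int)).toNat - 1]? with
        | some v => rfl
        | none => simp
    · simp only [if_neg hc]
      exact ih (r+1) acc hacc

-- ===== VERDICT (by name: the statement is the Claim_ definition above) =====
theorem funcf_spec : Claim_equal_funcf := by
  unfold Claim_equal_funcf
  intro n m _ hpre
  obtain ⟨hn, hm⟩ := hpre
  unfold Spec_funcf
  have hn0 : 0 < n := by omega
  set t := (pvRes n).length with ht_def
  have ht : 0 < t := pvRes_pos n hn
  have hmm1 : 1 ≤ m.toNat := by omega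
  set q := (m.toNat - 1) / t with hq_def
  set rem := (m.toNat - 1) % t with hrem_def
  have hdm : q * t + rem = m.toNat - 1 := by
    rw [hq_def, hrem_def, Nat.mul_comm]
    exact Nat.div_add_mod _ _
  have hq : q < m.toNat := lt_of_le_of_lt (Nat.div_le_self _ _) (by omega)
  have hrem : rem < t := Nat.mod_lt _ ht
  have hmt : m.toNat ≤ m.toNat * t := Nat.le_mul_of_pos_right _ ht
  have hblocks := filter_blocks n hn0 m.toNat
  have hlen : (pvBig n m.toNat).length = m.toNat * t := pvBig_length n m.toNat
  have hidx : (m - 0).toNat - 1 <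
      ((pvInts (n+1) (m.toNat * n.toNat)).filter (fun i => gcdA i n)).length := by
    rw [hblocks, hlen]
    omega
  have hA := loopA_eq n m (m.toNat * n.toNat) n 0 (by omega) hidx
  rw [hblocks] at hA
  have hix : (m - 0).toNat - 1 = q * t + rem := by omega
  rw [hix, pvBig_get n m.toNat q rem hq hrem] at hA
  rw [funcf, hA]
  rw [funcf_alt]
  have hres : (pvInts 1 n.toNat).filter (fun x => copB x n) = pvRes n := by
    rw [pvRes]
    exact List.filter_congr (fun r _ => copB_eq_gcdA n.natAbs n r le_rfl)
  have hB := buildB_eq n m n.toNat 1 [] (by simpa using hm)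
  rw [hres] at hB
  rw [hB]
  simp only [List.length_nil, Nat.cast_zero, sub_zero, List.nil_append]
  by_cases hcase : m.toNat - 1 < t
  · have hq0 : q = 0 := by rw [hq_def]; exact Nat.div_eq_of_lt (by omega)
    have hrem0 : rem = m.toNat - 1 := by rw [hrem_def]; exact Nat.mod_eq_of_lt (by omega)
    rw [hq0, hrem0]
    rw [List.getElem?_eq_getElem (show m.toNat - 1 < (pvRes n).length by omega)]
    simp
  · have hnone : (pvRes n)[m.toNat - 1]? = none := by
      rw [List.getElem?_eq_none_iff]
      omega
    rw [hnone]
    have htne : ¬ ((t : Nat) : Int) = 0 := by exact_mod_cast ht.ne'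
    have hm1 : m - 1 = ((m.toNat - 1 : Nat) : Int) := by omega
    have hfd : ((m.toNat - 1 : Nat) : Int).fdiv ((t : Nat) : Int) = ((q : Nat) : Int) := by
      rw [Int.fdiv_eq_ediv]
      · push_cast [hq_def]; rfl
    have hfm : ((m.toNat - 1 : Nat) : Int).fmod ((t : Nat) : Int) = ((rem : Nat) : Int) := by
      rw [Int.fmod_eq_emod]
      push_cast [hrem_def]; rfl
    simp only [PySem.Int.divmod?, ← ht_def, if_neg htne, hm1, hfd, hfm]
    simp only [PySem.List.pyGet?_natCast, List.getElem?_eq_getElem hrem]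
    simp
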